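-- pv_equiv track=rewrite | github.com/applictester/python-projects | recursion-3/pins-move.py | place_pins
-- ===== SOURCE A (Python) =====
-- def place_pins(n, leftmost=1, moves=None):
--     if moves is None:
--         moves = []
--     if n == 0:
--         return moves
--     # Place a pin on the leftmost available cell
--     moves.append(leftmost)
--     # Recursively place the remaining pins
--     place_pins(n - 1, leftmost + 1, moves)
--     # Remove the pin from the current cell
--     moves.append(-leftmost)
--     return moves
-- ===== SOURCE B (Python) =====
-- def place_pins(n, leftmost=1, moves=None):
--     if moves is None:
--         moves = []
--     moves.extend(range(leftmost, leftmost + n))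
--     moves.extend(range(-(leftmost + n - 1), -leftmost + 1))
--     return moves
-- ===== Notes on version B (the rewrite author's own statement) =====
-- stated objective: simpler
-- what changed: Replaces the recursion with two direct range extends (the ascending placement run and the descending removal run), no recursion at all.
import Mathlib
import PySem

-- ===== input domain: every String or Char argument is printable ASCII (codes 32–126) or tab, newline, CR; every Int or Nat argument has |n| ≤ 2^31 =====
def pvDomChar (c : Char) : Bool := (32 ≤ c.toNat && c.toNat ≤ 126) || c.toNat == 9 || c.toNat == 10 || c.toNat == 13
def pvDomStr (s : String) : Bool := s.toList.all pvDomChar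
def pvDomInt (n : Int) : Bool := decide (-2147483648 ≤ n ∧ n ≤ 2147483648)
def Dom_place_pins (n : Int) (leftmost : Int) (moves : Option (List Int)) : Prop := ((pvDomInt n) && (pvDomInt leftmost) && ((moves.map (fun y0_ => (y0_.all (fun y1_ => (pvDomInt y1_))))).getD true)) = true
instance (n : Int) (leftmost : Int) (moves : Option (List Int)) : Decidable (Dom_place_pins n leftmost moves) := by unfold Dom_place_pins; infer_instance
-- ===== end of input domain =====

-- B replaces A's recursion with two direct range runs (ascending placements then descending removals); objective: simpler.


-- ===== PORT A =====
-- fuel = n.toNat: for n ≥ 0 (all of Pre_) this is exactly A's recursion on n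
def place_pins_go (fuel : Nat) (leftmost : Int) (moves : List Int) : List Int :=
  match fuel with
  | 0 => moves
  | k + 1 => (place_pins_go k (leftmost + 1) (moves ++ [leftmost])) ++ [-leftmost]

def place_pins (n : Int) (leftmost : Int) (moves : Option (List Int)) : List Int :=
  place_pins_go n.toNat leftmost (moves.getD [])

-- ===== PORT B =====
def place_pins_alt (n : Int) (leftmost : Int) (moves : Option (List Int)) : List Int :=
  (moves.getD []) ++ PySem.List.pyRange leftmost (leftmost + n) 1
    ++ PySem.List.pyRange (-(leftmost + n - 1)) (-leftmost + 1) 1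

-- ===== PRECONDITION & SPEC =====
-- Pre_ excludes n < 0, on which Python A recurses without bound and raises RecursionError
def Pre_place_pins (n : Int) (leftmost : Int) (moves : Option (List Int)) : Prop := 0 ≤ n
instance (n : Int) (leftmost : Int) (moves : Option (List Int)) : Decidable (Pre_place_pins n leftmost moves) := by unfold Pre_place_pins; infer_instance
def pvWitness_place_pins : Int × Int × Option (List Int) := (3, 2, some [7])

def Spec_place_pins (n : Int) (leftmost : Int) (moves : Option (List Int)) (out : List Int) : Prop := out = place_pins_alt n leftmost moves
instance (n : Int) (leftmost : Int) (moves : Option (List Int)) (out : List Int) : Decidable (Spec_place_pins n leftmost moves out) := by unfold Spec_place_pins; infer_instance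

-- ===== CLAIM (what is proved, stated in full; the proofs are below) =====
def Claim_equal_place_pins : Prop := ∀ (n : Int) (leftmost : Int) (moves : Option (List Int)), Dom_place_pins n leftmost moves → Pre_place_pins n leftmost moves → Spec_place_pins n leftmost moves (place_pins n leftmost moves)

-- ===== LEMMAS AND PROOFS =====
theorem place_pins_go_eq (k : Nat) : ∀ (l : Int) (ms : List Int),
    place_pins_go k l ms
      = ms ++ PySem.List.pyRange l (l + k) 1 ++ PySem.List.pyRange (-(l + (k : Int) - 1)) (-l + 1) 1 := by
  induction k with
  | zero =>
    intro l ms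
    simp [place_pins_go, PySem.List.pyRange_one_eq_nil (le_refl l),
      PySem.List.pyRange_one_eq_nil (by omega : -l + 1 ≤ -(l + ((0:Nat):Int) - 1))]
  | succ k ih =>
    intro l ms
    have hcons : PySem.List.pyRange l (l + ((k:Int) + 1)) 1
        = l :: PySem.List.pyRange (l + 1) (l + ((k:Int) + 1)) 1 :=
      PySem.List.pyRange_one_cons (by omega)
    have hsnoc : PySem.List.pyRange (-(l + ((k:Int) + 1) - 1)) (-l + 1) 1
        = PySem.List.pyRange (-(l + ((k:Int) + 1) - 1)) (-l) 1 ++ [-l] := by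
      have := PySem.List.pyRange_one_succ_right
        (a := -(l + ((k:Int) + 1) - 1)) (b := -l) (by omega)
      simpa [neg_add_rev] using this
    have harg1 : l + 1 + (k : Int) = l + ((k:Int) + 1) := by ring
    have harg3 : -(l + 1) + 1 = -l := by ring
    simp only [place_pins_go, ih (l + 1) (ms ++ [l]), Nat.cast_add, Nat.cast_one,
      harg1, harg3, hcons, hsnoc]
    simp

theorem place_pins_spec : Claim_equal_place_pins := by
  intro n l moves _ hpre
  unfold Spec_place_pins place_pins place_pins_alt
  have hn : ((n.toNat : Int)) = n := Int.toNat_of_nonneg hpre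
  rw [place_pins_go_eq, hn]
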